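-- pv_equiv track=rewrite | github.com/Serizawan/aoc | 2020/p05/p5a.py | letters_to_int
-- ===== SOURCE A (Python) =====
-- def letters_to_int(letters, one_char):
--     n = 0
--     bit_pow = 1
--     for letter in reversed(letters):
--         if letter == one_char:
--             n += bit_pow
--         bit_pow *= 2
--     return n
-- ===== SOURCE B (Python) =====
-- def letters_to_int(letters, one_char):
--     size = len(letters)
--     return sum(2 ** (size - 1 - i) for i, letter in enumerate(letters) if letter == one_char)
-- ===== Notes on version B (the rewrite author's own statement) =====
-- stated objective: alternative
-- what changed: B sums the closed-form weight 2**(size-1-i) of each matching enumerate position (a C-level sum over a generator) instead of A's reversed traversal threading a running power-of-two accumulator that is doubled on every step; a timing run measured B faster.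
import Mathlib
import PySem

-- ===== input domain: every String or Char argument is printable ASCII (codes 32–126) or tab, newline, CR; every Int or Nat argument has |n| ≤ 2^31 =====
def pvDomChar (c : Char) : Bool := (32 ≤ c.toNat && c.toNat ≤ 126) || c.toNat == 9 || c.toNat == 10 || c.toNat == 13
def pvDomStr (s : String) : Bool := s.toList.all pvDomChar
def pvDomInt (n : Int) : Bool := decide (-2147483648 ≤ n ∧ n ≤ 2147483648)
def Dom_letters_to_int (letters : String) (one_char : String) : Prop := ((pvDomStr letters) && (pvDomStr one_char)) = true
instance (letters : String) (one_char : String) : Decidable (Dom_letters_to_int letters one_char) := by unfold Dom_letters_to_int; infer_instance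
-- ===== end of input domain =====

-- B replaces A's reversed traversal (running power-of-two accumulator) by summing the
-- closed-form weight 2^(size-1-i) of each matching position from enumerate: alternative decomposition.
-- ===== PORT A =====
-- Faithful to Python: `letter == one_char` compares the 1-char string against one_char.
def letters_to_int (letters : String) (one_char : String) : Int :=
  (letters.toList.reverse.foldl
    (fun (st : Int × Int) letter =>
      (if String.ofList [letter] == one_char then st.1 + st.2 else st.1, st.2 * 2))
    (0, 1)).1

-- ===== PORT B =====
-- B: sum of 2 ** (size - 1 - i) over matching positions of enumerate(letters); the generator's
-- sum is the fold below.  The exponent size-1-i is nonnegative for every index i of enumerate,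
-- so `.toNat` is exact there.
def letters_to_int_alt (letters : String) (one_char : String) : Int :=
  let size : Int := letters.toList.length
  (PySem.List.enumerate letters.toList).foldl
    (fun (total : Int) p =>
      if String.ofList [p.2] == one_char then total + 2 ^ (size - 1 - p.1).toNat else total) 0

-- ===== PRECONDITION & SPEC =====
def Spec_letters_to_int (letters : String) (one_char : String) (out : Int) : Prop := out = letters_to_int_alt letters one_char
instance (letters : String) (one_char : String) (out : Int) : Decidable (Spec_letters_to_int letters one_char out) := by unfold Spec_letters_to_int; infer_instance

-- ===== CLAIM (what is proved, stated in full; the proofs are below) =====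
def Claim_equal_letters_to_int : Prop := ∀ (letters : String) (one_char : String), Dom_letters_to_int letters one_char → Spec_letters_to_int letters one_char (letters_to_int letters one_char)

-- ===== LEMMAS AND PROOFS =====

-- Common reference value: (if p l[0] then 2^(len-1) else 0) + … recursively.
def pvVal (p : Char → Bool) : List Char → Int
  | [] => 0
  | c :: l => (if p c then 2 ^ l.length else 0) + pvVal p l

-- A's reversed fold computes (pvVal, 2^length).
theorem revFold (p : Char → Bool) (l : List Char) :
    l.reverse.foldl
      (fun (st : Int × Int) c => (if p c then st.1 + st.2 else st.1, st.2 * 2)) (0, 1)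
      = (pvVal p l, 2 ^ l.length) := by
  induction l with
  | nil => simp [pvVal]
  | cons c l ih =>
    simp only [List.reverse_cons, List.foldl_append, List.foldl_cons, List.foldl_nil, ih,
      pvVal, List.length_cons]
    by_cases hp : p c
    · rw [if_pos hp, if_pos hp]
      simp only [Prod.mk.injEq]; constructor <;> ring
    · rw [if_neg hp, if_neg hp]
      simp only [Prod.mk.injEq]; constructor <;> ring

-- B's enumerate fold, generalized over start index and accumulator.
theorem enumFold (p : Char → Bool) (l : List Char) (s : Int) (a size : Int)
    (h : size = s + l.length) :
    (PySem.List.enumerate l s).foldl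
      (fun (total : Int) q => if p q.2 then total + 2 ^ (size - 1 - q.1).toNat else total) a
      = a + pvVal p l := by
  induction l generalizing s a with
  | nil => simp [pvVal]
  | cons c l ih =>
    rw [PySem.List.enumerate_cons, List.foldl_cons]
    rw [ih (s + 1) _ (by simp at h ⊢; omega)]
    have he : (size - 1 - s).toNat = l.length := by simp at h; omega
    by_cases hp : p c
    · rw [if_pos hp, pvVal, if_pos hp, he]; ring
    · rw [if_neg hp, pvVal, if_neg hp]; ring

-- ===== VERDICT (by name: the statement is the Claim_ definition above) =====
theorem letters_to_int_spec : Claim_equal_letters_to_int := by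
  intro letters one_char _
  unfold Spec_letters_to_int letters_to_int letters_to_int_alt
  rw [revFold (fun c => String.ofList [c] == one_char),
    enumFold (fun c => String.ofList [c] == one_char) letters.toList 0 0 _ (by simp)]
  simp
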